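-- pv_equiv track=rewrite | github.com/jeremymiller00/hackerrank | src/drawingBook.py | pageCount
-- ===== SOURCE A (Python) =====
-- def pageCount(n, p):
--     f_turns = 0
--     if p == 1 or p == n:
--         return 0
--     current_page_f = 1
--     while current_page_f <= p:
--         current_page_f += 2
--         f_turns += 1
--     b_turns = 0
--     if n % 2 == 0:
--         current_page_b = n
--     else:
--         current_page_b = n + 1
--     while current_page_b >= p:
--         current_page_b -= 2
--         b_turns += 1
--     return min(f_turns, b_turns)
-- ===== SOURCE B (Python) =====
-- def pageCount(n, p):
--     # Closed form for the same counts A computes by looping: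
--     # front turns = ceil(p/2) (0 if p < 1), back turns from the even page
--     # m = n rounded up to even: (m - p)//2 + 1 (0 if m < p - 1).
--     if p == 1 or p == n:
--         return 0
--     f = max(0, (p + 1) // 2)
--     m = n if n % 2 == 0 else n + 1
--     b = max(0, (m - p) // 2 + 1)
--     return min(f, b)
-- ===== Notes on version B (the rewrite author's own statement) =====
-- stated objective: faster
-- what changed: Replaces A's two step-by-2 counting loops with closed-form floor-division formulas for the front- and back-turn counts.
import Mathlib
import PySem

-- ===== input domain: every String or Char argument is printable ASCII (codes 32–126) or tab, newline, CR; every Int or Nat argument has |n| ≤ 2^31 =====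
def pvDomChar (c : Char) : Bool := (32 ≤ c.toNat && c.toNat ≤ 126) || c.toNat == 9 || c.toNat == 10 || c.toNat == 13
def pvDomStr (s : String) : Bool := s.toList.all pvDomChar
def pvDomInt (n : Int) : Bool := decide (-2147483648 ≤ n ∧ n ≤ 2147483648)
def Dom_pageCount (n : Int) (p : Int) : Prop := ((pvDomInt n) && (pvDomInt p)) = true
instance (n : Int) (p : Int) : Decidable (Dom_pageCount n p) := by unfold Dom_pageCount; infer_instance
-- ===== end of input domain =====

-- B replaces A's two counting loops by closed-form floor-division formulas (O(1) vs O(n)).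

-- ===== PORT A =====
-- while current_page_f <= p: current_page_f += 2; f_turns += 1
def pageCountFLoop (cur : Int) (p : Int) (t : Int) : Int :=
  if cur ≤ p then pageCountFLoop (cur + 2) p (t + 1) else t
termination_by (p + 1 - cur).toNat
decreasing_by omega

-- while current_page_b >= p: current_page_b -= 2; b_turns += 1
def pageCountBLoop (cur : Int) (p : Int) (t : Int) : Int :=
  if cur ≥ p then pageCountBLoop (cur - 2) p (t + 1) else t
termination_by (cur + 1 - p).toNat
decreasing_by omega

def pageCount (n : Int) (p : Int) : Int :=
  if p = 1 ∨ p = n then 0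
  else
    let f_turns := pageCountFLoop 1 p 0
    let current_page_b := if PySem.Int.mod n 2 = 0 then n else n + 1
    let b_turns := pageCountBLoop current_page_b p 0
    min f_turns b_turns

-- ===== PORT B =====
def pageCount_alt (n : Int) (p : Int) : Int :=
  if p = 1 ∨ p = n then 0
  else
    let f := max 0 (PySem.Int.floordiv (p + 1) 2)
    let m := if PySem.Int.mod n 2 = 0 then n else n + 1
    let b := max 0 (PySem.Int.floordiv (m - p) 2 + 1)
    min f b

-- ===== PRECONDITION & SPEC =====
def Spec_pageCount (n : Int) (p : Int) (out : Int) : Prop := out = pageCount_alt n p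
instance (n : Int) (p : Int) (out : Int) : Decidable (Spec_pageCount n p out) := by unfold Spec_pageCount; infer_instance

-- ===== CLAIM (what is proved, stated in full; the proofs are below) =====
def Claim_equal_pageCount : Prop := ∀ (n : Int) (p : Int), Dom_pageCount n p → Spec_pageCount n p (pageCount n p)

-- ===== LEMMAS AND PROOFS =====
theorem pageCountFLoop_eq (cur p t : Int) :
    pageCountFLoop cur p t = t + max 0 ((p - cur) / 2 + 1) := by
  fun_induction pageCountFLoop cur p t with
  | case1 cur t h ih =>
      rw [ih]
      omega
  | case2 cur t h =>
      omega

theorem pageCountBLoop_eq (cur p t : Int) :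
    pageCountBLoop cur p t = t + max 0 ((cur - p) / 2 + 1) := by
  fun_induction pageCountBLoop cur p t with
  | case1 cur t h ih =>
      rw [ih]
      omega
  | case2 cur t h =>
      omega

-- ===== VERDICT (by name: the statement is the Claim_ definition above) =====
theorem pageCount_spec : Claim_equal_pageCount := by
  intro n p _
  unfold Spec_pageCount pageCount pageCount_alt
  split
  · rfl
  · simp only [pageCountFLoop_eq, pageCountBLoop_eq,
      PySem.Int.floordiv_eq_ediv_of_pos (a := p + 1) (by omega : (0:Int) < 2)]
    split <;>
      rw [PySem.Int.floordiv_eq_ediv_of_pos (by omega : (0:Int) < 2)] <;> omega
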